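-- pv_equiv track=rewrite | github.com/Derling/algorithms | python_200_problems/list/check_a_list_contains_sublist.py | check_sublist
-- ===== SOURCE A (Python) =====
-- def check_sublist(array, subarray):
--     if len(subarray) > len(array):
--         return False
--     if subarray == []:
--         return True
--     start_count = array.count(subarray[0])
--     start_index = 0
--     while start_count:
--         start_index = array.index(subarray[0], start_index)
--         subarray_len = 0
--         for s, i in enumerate(range(start_index, start_index + len(subarray))):
--             if i == len(array):
--                 break
--             else:
--                 if subarray[s] == array[i]:
--                     subarray_len = subarray_len + 1
--                 else:
--                     break
--         if subarray_len == len(subarray):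
--             return True
--         start_index = start_index + 1
--         start_count = start_count - 1
--     return False
-- ===== SOURCE B (Python) =====
-- def check_sublist(array, subarray):
--     m = len(subarray)
--     return any(array[i:i + m] == subarray for i in range(len(array) - m + 1))
-- ===== Notes on version B (the rewrite author's own statement) =====
-- stated objective: simpler
-- what changed: Replaces A's count/index occurrence-scanning while-loop with hand-rolled element-by-element prefix matching by a single sliding-window comprehension comparing each m-length slice to the subarray.
import Mathlib
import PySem

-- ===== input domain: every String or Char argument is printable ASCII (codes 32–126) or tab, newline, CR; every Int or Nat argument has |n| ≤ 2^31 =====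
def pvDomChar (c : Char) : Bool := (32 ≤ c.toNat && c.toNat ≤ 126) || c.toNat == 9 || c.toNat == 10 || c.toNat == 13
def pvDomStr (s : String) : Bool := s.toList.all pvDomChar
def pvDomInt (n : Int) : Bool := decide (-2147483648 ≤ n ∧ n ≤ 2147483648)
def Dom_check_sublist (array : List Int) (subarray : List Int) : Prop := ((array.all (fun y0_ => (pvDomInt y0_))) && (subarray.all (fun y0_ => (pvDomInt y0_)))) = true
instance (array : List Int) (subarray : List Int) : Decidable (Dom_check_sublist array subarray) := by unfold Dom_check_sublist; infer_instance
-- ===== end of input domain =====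

-- B changes the algorithm: A scans the occurrences of subarray[0] via count/index and
-- hand-matches from each; B compares each m-length window slice to subarray directly.

-- ===== PORT A =====

-- inner for-loop of A: the final value of subarray_len, matching subarray against
-- array[start_index:] element by element, stopping at the first mismatch or at the end of array
def csMatchLen : List Int → List Int → Nat
  | s :: ss, a :: as => if s == a then csMatchLen ss as + 1 else 0
  | _, _ => 0

-- A's while-loop; start_count is the fuel, start_index the scan position.
-- array.index(subarray[0], start_index) is ported as index? on (array.drop start);
-- the none branch is unreachable in A (the fuel counts remaining occurrences).
def csLoop (array sub : List Int) (x : Int) : Nat → Nat → Bool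
  | 0, _ => false
  | fuel + 1, start =>
    match PySem.List.index? (List.drop start array) x with
    | none => false
    | some k =>
      if csMatchLen sub (List.drop (start + k) array) == sub.length then true
      else csLoop array sub x fuel (start + k + 1)

def check_sublist (array : List Int) (subarray : List Int) : Bool :=
  if subarray.length > array.length then false
  else
    match subarray with
    | [] => true
    | x :: _ => csLoop array subarray x (PySem.List.count array x) 0

-- ===== PORT B =====
def check_sublist_alt (array : List Int) (subarray : List Int) : Bool :=
  let m : Int := subarray.length
  (PySem.List.pyRange 0 ((array.length : Int) - m + 1) 1).any
    (fun i => PySem.List.slice array (some i) (some (i + m)) == subarray)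

-- ===== PRECONDITION & SPEC =====
def Spec_check_sublist (array : List Int) (subarray : List Int) (out : Bool) : Prop := out = check_sublist_alt array subarray
instance (array : List Int) (subarray : List Int) (out : Bool) : Decidable (Spec_check_sublist array subarray out) := by unfold Spec_check_sublist; infer_instance

-- ===== CLAIM (what is proved, stated in full; the proofs are below) =====
def Claim_equal_check_sublist : Prop := ∀ (array : List Int) (subarray : List Int), Dom_check_sublist array subarray → Spec_check_sublist array subarray (check_sublist array subarray)

-- ===== LEMMAS AND PROOFS =====

-- full match of the inner loop = subarray is a prefix of the remaining array
theorem csMatchLen_eq_length_iff (s a : List Int) :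
    csMatchLen s a = s.length ↔ s <+: a := by
  induction s generalizing a with
  | nil => simp [csMatchLen]
  | cons x ss ih =>
    cases a with
    | nil => simp [csMatchLen]
    | cons y as =>
      by_cases hxy : x = y
      · subst hxy
        simp [csMatchLen, List.cons_prefix_iff, ih]
      · constructor
        · intro h
          exfalso
          simp [csMatchLen, beq_eq_false_iff_ne.mpr hxy] at h
        · intro h
          exfalso
          rcases List.cons_prefix_iff.mp h with ⟨l', hl', -⟩
          exact hxy ((List.cons.inj hl').1).symm

theorem csLoop_iff (array : List Int) (x : Int) (rest : List Int) :
    ∀ fuel start, fuel = (List.drop start array).count x →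
      (csLoop array (x :: rest) x fuel start = true ↔
        ∃ p, start ≤ p ∧ (x :: rest) <+: List.drop p array) := by
  intro fuel
  induction fuel with
  | zero =>
    intro start h
    simp only [csLoop, Bool.false_eq_true, false_iff]
    rintro ⟨p, hsp, hpre⟩
    have hx : x ∉ List.drop start array := List.count_eq_zero.mp h.symm
    rcases List.cons_prefix_iff.mp hpre with ⟨l', hl', -⟩
    have hxp : x ∈ List.drop p array := by rw [hl']; exact List.mem_cons_self
    have : List.drop p array = List.drop (start + (p - start)) array := by
      congr 1; omega
    rw [this, ← List.drop_drop] at hxp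
    exact hx (List.mem_of_mem_drop hxp)
  | succ fuel ih =>
    intro start h
    have hxmem : x ∈ List.drop start array := by
      by_contra hc
      have := List.count_eq_zero.mpr hc
      omega
    rcases Option.isSome_iff_exists.mp
        ((PySem.List.index?_isSome_iff (List.drop start array) x).mpr hxmem) with ⟨k, hk⟩
    rcases PySem.List.getElem_of_index?_eq_some hk with ⟨hklt, hkx, hjlt⟩
    simp only [csLoop, hk]
    by_cases hm : csMatchLen (x :: rest) (List.drop (start + k) array) = (x :: rest).length
    · simp only [hm, beq_self_eq_true, if_true, true_iff]
      exact ⟨start + k, by omega, (csMatchLen_eq_length_iff _ _).mp hm⟩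
    · have hbeq : (csMatchLen (x :: rest) (List.drop (start + k) array) == (x :: rest).length) = false :=
        beq_eq_false_iff_ne.mpr hm
      rw [hbeq]
      show csLoop array (x :: rest) x fuel (start + k + 1) = true ↔ _
      -- fuel for the recursive call
      have hdd : List.drop (start + k + 1) array
          = List.drop (k + 1) (List.drop start array) := by
        rw [List.drop_drop, ← Nat.add_assoc]
      have hcount : fuel = (List.drop (start + k + 1) array).count x := by
        set L := List.drop start array with hL
        have hsplit : L = List.take (k + 1) L ++ List.drop (k + 1) L := by
          simp
        have htake : (List.take (k + 1) L).count x = 1 := by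
          have : List.take (k + 1) L = List.take k L ++ [L[k]] := by
            rw [List.take_add_one]
            simp [List.getElem?_eq_getElem hklt]
          rw [this, List.count_append, hkx]
          have hzero : (List.take k L).count x = 0 := by
            rw [List.count_eq_zero]
            intro hmem
            rcases List.getElem_of_mem hmem with ⟨j, hj, hje⟩
            have hjk : j < k := by
              have := hj; simp [List.length_take] at this; omega
            have : L[j] = x := by
              rw [← hje, List.getElem_take]
            exact hjlt j hjk this
          simp [hzero]
        have := congrArg (List.count x) hsplit
        rw [List.count_append, htake] at this
        rw [hdd]
        omega
      rw [ih (start + k + 1) hcount]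
      constructor
      · rintro ⟨q, hq, hpre⟩
        exact ⟨q, by omega, hpre⟩
      · rintro ⟨q, hq, hpre⟩
        refine ⟨q, ?_, hpre⟩
        by_contra hlt
        have hlt : q < start + k + 1 := Nat.lt_of_not_le (fun hle => hlt hle)
        -- q ≤ start + k
        rcases Nat.lt_or_ge q (start + k) with hqlt | hqge
        · -- array[q] = x but q is before the first occurrence at start+k
          rcases List.cons_prefix_iff.mp hpre with ⟨l', hl', -⟩
          have hqlen : q < array.length := by
            have : (List.drop q array).length ≠ 0 := by rw [hl']; simp
            simp at this; omega
          have hq1 : array[q] = x := by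
            have h0 : (List.drop q array)[0]'(by rw [hl']; simp) = x := by
              simp [hl']
            rw [List.getElem_drop] at h0
            simpa using h0
          have hj : q - start < k := by omega
          have : (List.drop start array)[q - start]'(by omega) = x := by
            rw [List.getElem_drop]
            have : start + (q - start) = q := by omega
            simp [this, hq1]
          exact hjlt (q - start) hj this
        · -- q = start + k : full match there, contradicting hm
          have hqe : q = start + k := by omega
          subst hqe
          exact hm ((csMatchLen_eq_length_iff _ _).mpr hpre)

theorem check_sublist_iff (array subarray : List Int) :
    check_sublist array subarray = true ↔
      ∃ p, subarray <+: List.drop p array := by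
  unfold check_sublist
  by_cases hlen : subarray.length > array.length
  · simp only [hlen, if_true, Bool.false_eq_true, false_iff]
    rintro ⟨p, hpre⟩
    have := hpre.length_le
    simp at this
    omega
  · simp only [hlen, if_false]
    cases subarray with
    | nil =>
      exact ⟨fun _ => ⟨0, List.nil_prefix⟩, fun _ => rfl⟩
    | cons x rest =>
      show csLoop array (x :: rest) x (PySem.List.count array x) 0 = true ↔ _
      rw [PySem.List.count_eq,
        csLoop_iff array x rest (List.count x array) 0 (by simp)]
      constructor
      · rintro ⟨p, -, h⟩; exact ⟨p, h⟩
      · rintro ⟨p, h⟩; exact ⟨p, Nat.zero_le _, h⟩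

theorem check_sublist_alt_iff (array subarray : List Int) :
    check_sublist_alt array subarray = true ↔
      ∃ p, subarray <+: List.drop p array := by
  unfold check_sublist_alt
  simp only [List.any_eq_true, beq_iff_eq]
  constructor
  · rintro ⟨i, hi, hsl⟩
    rw [PySem.List.mem_pyRange_iff_of_pos (by norm_num : (0:Int) < 1)] at hi
    obtain ⟨hi0, hilt, -⟩ := hi
    refine ⟨i.toNat, ?_⟩
    rw [List.prefix_iff_eq_take]
    rw [PySem.List.slice_toNat array hi0 (by omega)] at hsl
    have : (i + (subarray.length : Int)).toNat - i.toNat = subarray.length := by omega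
    rw [this] at hsl
    exact hsl.symm
  · rintro ⟨p, hpre⟩
    -- normalise the witness so that q + m ≤ n (if p overshoots, subarray must be [])
    obtain ⟨q, hqle, hqdrop⟩ :
        ∃ q, q + subarray.length ≤ array.length ∧ subarray <+: List.drop q array := by
      rcases Nat.le_total p array.length with hp | hp
      · have := hpre.length_le
        simp only [List.length_drop] at this
        exact ⟨p, by omega, hpre⟩
      · rw [List.drop_eq_nil_of_le hp] at hpre
        have hs : subarray = [] := List.prefix_nil.mp hpre
        subst hs
        exact ⟨0, by simp, List.nil_prefix⟩
    refine ⟨(q : Int), ?_, ?_⟩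
    · rw [PySem.List.mem_pyRange_iff_of_pos (by norm_num : (0:Int) < 1)]
      refine ⟨by positivity, by omega, one_dvd _⟩
    · have h0 : (0:Int) ≤ (q:Int) := by positivity
      rw [PySem.List.slice_toNat array h0 (by positivity)]
      have : ((q:Int) + (subarray.length : Int)).toNat - (q:Int).toNat = subarray.length := by
        omega
      rw [this]
      simp only [Int.toNat_natCast]
      exact ((List.prefix_iff_eq_take).mp hqdrop).symm

-- ===== VERDICT (by name: the statement is the Claim_ definition above) =====
theorem check_sublist_spec : Claim_equal_check_sublist := by
  intro array subarray _
  unfold Spec_check_sublist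
  rw [Bool.eq_iff_iff, check_sublist_iff, check_sublist_alt_iff]
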